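-- pv_equiv track=rewrite | github.com/bartlomiejszozda/handwrittenPairsGenerator | helpers/distributePairsBetweenGenerators.py | splitPairsFairly
-- ===== SOURCE A (Python) =====
-- def splitPairsFairly(sortedPairsWithRecognitionVal, numOfProcess):
--   pairsPerProcess = [[] for i in range(numOfProcess)]
--   processNum=0
--   for pair_recognitionVal in sortedPairsWithRecognitionVal:
--     pairsPerProcess[processNum].append(pair_recognitionVal[0])
--     processNum+=1
--     processNum=processNum%numOfProcess
--   return pairsPerProcess
-- ===== SOURCE B (Python) =====
-- def splitPairsFairly(sortedPairsWithRecognitionVal, numOfProcess):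
--     return [
--         [pair[0] for idx, pair in enumerate(sortedPairsWithRecognitionVal)
--          if idx % numOfProcess == i]
--         for i in range(numOfProcess)
--     ]
-- ===== Notes on version B (the rewrite author's own statement) =====
-- stated objective: alternative
-- what changed: Replaces A's single stateful pass with a modular counter and in-place bucket appends by one comprehension per process that selects the elements whose enumerate index is congruent to i mod numOfProcess.
import Mathlib
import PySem

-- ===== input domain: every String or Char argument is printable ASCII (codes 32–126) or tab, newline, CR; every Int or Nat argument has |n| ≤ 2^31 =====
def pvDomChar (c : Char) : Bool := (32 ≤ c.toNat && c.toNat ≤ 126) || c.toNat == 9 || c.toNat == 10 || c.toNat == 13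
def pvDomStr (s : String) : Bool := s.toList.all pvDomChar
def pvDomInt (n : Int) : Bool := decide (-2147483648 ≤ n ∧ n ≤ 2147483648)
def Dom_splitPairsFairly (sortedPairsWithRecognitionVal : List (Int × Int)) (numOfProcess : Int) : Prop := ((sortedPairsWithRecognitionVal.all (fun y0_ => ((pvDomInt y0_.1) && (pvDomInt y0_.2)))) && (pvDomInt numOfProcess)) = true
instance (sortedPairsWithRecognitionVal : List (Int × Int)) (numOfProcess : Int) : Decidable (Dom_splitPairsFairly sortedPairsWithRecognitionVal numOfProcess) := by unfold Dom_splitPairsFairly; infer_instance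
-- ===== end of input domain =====

-- B replaces A's single stateful pass (modular counter + in-place appends) by one
-- comprehension per process selecting the elements whose index ≡ i (mod numOfProcess);
-- objective: alternative decomposition, same results on Pre_.

-- ===== PORT A =====
-- pairsPerProcess = [[] for i in range(numOfProcess)]; then a single pass appending
-- pair[0] to bucket processNum, with processNum = (processNum + 1) % numOfProcess.
-- On every input Pre_ admits, processNum stays in [0, numOfProcess), so the plain
-- Nat index (toNat + List.modify) is exact there.
def splitPairsFairly (sortedPairsWithRecognitionVal : List (Int × Int)) (numOfProcess : Int) : List (List Int) :=
  (sortedPairsWithRecognitionVal.foldl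
      (fun st p =>
        (st.1.modify st.2.toNat (fun b => b ++ [p.1]),
         PySem.Int.mod (st.2 + 1) numOfProcess))
      (((PySem.List.pyRange 0 numOfProcess 1).map (fun _ => ([] : List Int))), (0 : Int))).1

-- ===== PORT B =====
-- [[pair[0] for idx, pair in enumerate(xs) if idx % numOfProcess == i] for i in range(numOfProcess)]
def splitPairsFairly_alt (sortedPairsWithRecognitionVal : List (Int × Int)) (numOfProcess : Int) : List (List Int) :=
  (PySem.List.pyRange 0 numOfProcess 1).map (fun i =>
    ((PySem.List.enumerate sortedPairsWithRecognitionVal).filter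
        (fun kp => PySem.Int.mod kp.1 numOfProcess == i)).map (fun kp => kp.2.1))

-- ===== PRECONDITION & SPEC =====
-- Pre_ excludes exactly the inputs where A raises IndexError: a non-empty pair list
-- with numOfProcess ≤ 0 (the bucket list is empty, so pairsPerProcess[0] fails).
def Pre_splitPairsFairly (sortedPairsWithRecognitionVal : List (Int × Int)) (numOfProcess : Int) : Prop :=
  sortedPairsWithRecognitionVal = [] ∨ 0 < numOfProcess
instance (sortedPairsWithRecognitionVal : List (Int × Int)) (numOfProcess : Int) : Decidable (Pre_splitPairsFairly sortedPairsWithRecognitionVal numOfProcess) := by unfold Pre_splitPairsFairly; infer_instance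

def pvWitness_splitPairsFairly : (List (Int × Int)) × Int := ([(1, 9), (2, 8), (3, 7), (4, 6), (5, 5)], 2)

def Spec_splitPairsFairly (sortedPairsWithRecognitionVal : List (Int × Int)) (numOfProcess : Int) (out : List (List Int)) : Prop := out = splitPairsFairly_alt sortedPairsWithRecognitionVal numOfProcess
instance (sortedPairsWithRecognitionVal : List (Int × Int)) (numOfProcess : Int) (out : List (List Int)) : Decidable (Spec_splitPairsFairly sortedPairsWithRecognitionVal numOfProcess out) := by unfold Spec_splitPairsFairly; infer_instance

-- ===== CLAIM (what is proved, stated in full; the proofs are below) =====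
def Claim_equal_splitPairsFairly : Prop := ∀ (sortedPairsWithRecognitionVal : List (Int × Int)) (numOfProcess : Int), Dom_splitPairsFairly sortedPairsWithRecognitionVal numOfProcess → Pre_splitPairsFairly sortedPairsWithRecognitionVal numOfProcess → Spec_splitPairsFairly sortedPairsWithRecognitionVal numOfProcess (splitPairsFairly sortedPairsWithRecognitionVal numOfProcess)


-- ===== LEMMAS AND PROOFS =====

-- selRR n i j xs: the values pair.1 that round-robin (counter starting at j) sends to bucket i.
def selRR (n i : Int) : Int → List (Int × Int) → List Int
  | _, [] => []
  | j, x :: xs => (if PySem.Int.mod j n = i then [x.1] else []) ++ selRR n i (PySem.Int.mod (j + 1) n) xs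

-- A's fold invariant: from bucket state bs and counter j, bucket i ends as bs[i] ++ selRR n i j xs.
theorem foldA (n : Int) (hn : 0 < n) :
    ∀ (xs : List (Int × Int)) (bs : List (List Int)) (j : Int),
      0 ≤ j → j < n → (bs.length : Int) = n →
      (xs.foldl
          (fun st p =>
            (st.1.modify st.2.toNat (fun b => b ++ [p.1]),
             PySem.Int.mod (st.2 + 1) n))
          (bs, j)).1
        = (PySem.List.pyRange 0 n 1).map (fun i => bs[i.toNat]! ++ selRR n i j xs) := by
  intro xs
  induction xs with
  | nil =>
    intro bs j _ _ hlen
    simp only [List.foldl_nil, selRR, List.append_nil]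
    rw [← hlen, ← Int.natCast_zero]
    norm_cast
    rw [PySem.List.pyRange_zero_natCast bs.length, List.map_map]
    apply List.ext_getElem
    · simp
    · intro k h1 h2
      simp only [List.getElem_map, List.getElem_range, Function.comp_apply, Int.toNat_natCast]
      rw [getElem!_pos]
  | cons x xs ih =>
    intro bs j hj0 hjn hlen
    simp only [List.foldl_cons]
    rw [ih (bs.modify j.toNat (fun b => b ++ [x.1])) (PySem.Int.mod (j + 1) n)
        (PySem.Int.mod_nonneg _ hn) (PySem.Int.mod_lt _ hn)
        (by rw [List.length_modify]; exact hlen)]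
    apply List.map_congr_left
    intro i hi
    rw [PySem.List.mem_pyRange_one] at hi
    have hmj : PySem.Int.mod j n = j := by
      rw [PySem.Int.mod_eq_emod_of_pos hn, Int.emod_eq_of_lt hj0 hjn]
    have hjlt : j.toNat < bs.length := by omega
    have hilt : i.toNat < bs.length := by omega
    simp only [selRR, hmj]
    by_cases h : j = i
    · subst h
      rw [if_pos rfl,
          getElem!_pos (bs.modify j.toNat (fun b => b ++ [x.1])) j.toNat
            (by rw [List.length_modify]; exact hilt),
          getElem!_pos bs j.toNat hilt, List.getElem_modify]
      simp
    · have hne : j.toNat ≠ i.toNat := by omega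
      rw [if_neg h,
          getElem!_pos (bs.modify j.toNat (fun b => b ++ [x.1])) i.toNat
            (by rw [List.length_modify]; exact hilt),
          getElem!_pos bs i.toNat hilt, List.getElem_modify, if_neg hne]
      simp

-- B's bucket i is selRR with the counter reduced mod n.
theorem selB (n i : Int) (hn : 0 < n) :
    ∀ (xs : List (Int × Int)) (j : Int),
      ((PySem.List.enumerate xs j).filter (fun kp => PySem.Int.mod kp.1 n == i)).map (fun kp => kp.2.1)
        = selRR n i (PySem.Int.mod j n) xs := by
  intro xs
  induction xs with
  | nil => intro j; simp [PySem.List.enumerate_nil, selRR]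
  | cons x xs ih =>
    intro j
    have hmm : PySem.Int.mod (PySem.Int.mod j n) n = PySem.Int.mod j n := by
      simp only [PySem.Int.mod_eq_emod_of_pos hn]
      exact Int.emod_emod_of_dvd j dvd_rfl
    have hshift : PySem.Int.mod (PySem.Int.mod j n + 1) n = PySem.Int.mod (j + 1) n := by
      simp only [PySem.Int.mod_eq_emod_of_pos hn]
      calc (j % n + 1) % n = (j % n + 1 + n * (j / n)) % n := (Int.add_mul_emod_self_left _ _ _).symm
        _ = (j + 1) % n := by
              have := Int.emod_add_mul_ediv j n
              congr 1
              linarith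
    rw [PySem.List.enumerate_cons]
    simp only [selRR, hmm, hshift, List.filter_cons, ← ih (j + 1)]
    by_cases h : PySem.Int.mod j n = i
    · simp [h]
    · simp [h]

-- ===== VERDICT (by name: the statement is the Claim_ definition above) =====
theorem splitPairsFairly_spec : Claim_equal_splitPairsFairly := by
  intro xs n _ hpre
  unfold Spec_splitPairsFairly
  rcases hpre with h | hn
  · subst h
    simp [splitPairsFairly, splitPairsFairly_alt, PySem.List.enumerate_nil]
  · unfold splitPairsFairly splitPairsFairly_alt
    have hlen : ((((PySem.List.pyRange 0 n 1).map (fun _ => ([] : List Int)))).length : Int) = n := by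
      rw [List.length_map, PySem.List.length_pyRange_one]
      omega
    rw [foldA n hn xs _ 0 le_rfl hn hlen]
    apply List.map_congr_left
    intro i hi
    rw [PySem.List.mem_pyRange_one] at hi
    rw [selB n i hn xs 0]
    have h0 : PySem.Int.mod 0 n = 0 := by
      rw [PySem.Int.mod_eq_emod_of_pos hn]; exact Int.zero_emod n
    rw [h0]
    have hilt : i.toNat < ((PySem.List.pyRange 0 n 1).map (fun _ => ([] : List Int))).length := by
      rw [List.length_map, PySem.List.length_pyRange_one]; omega
    rw [getElem!_pos ((PySem.List.pyRange 0 n 1).map (fun _ => ([] : List Int))) i.toNat hilt, List.getElem_map]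
    simp
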